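-- pv_equiv track=rewrite | github.com/ZhijunLStudio/autotrainer | autotrainer/skills/plan_experiment/handler.py | generate_factor_grid
-- ===== SOURCE A (Python) =====
-- import itertools
--
-- def generate_factor_grid(
--
--     base_config: dict,
--     factors: dict[str, list],
-- ) -> list[dict]:
--     """Generate all combinations of factor values (full grid)."""
--     keys = list(factors.keys())
--     values = list(factors.values())
--     configs = []
--     for combo in itertools.product(*values):
--         config = {}
--         for key, value in zip(keys, combo):
--             config[key] = value
--         configs.append(config)
--     return configs
-- ===== SOURCE B (Python) =====
-- def generate_factor_grid(
--     base_config: dict,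
--     factors: dict[str, list],
-- ) -> list[dict]:
--     """Generate all combinations of factor values (full grid), one factor at a time."""
--     configs = [{}]
--     for key, values in factors.items():
--         configs = [{**c, key: v} for c in configs for v in values]
--     return configs
-- ===== Notes on version B (the rewrite author's own statement) =====
-- stated objective: alternative
-- what changed: Replaces itertools.product over all value lists (plus an inner zip loop rebuilding each dict) with an incremental fold that starts from [{}] and extends every partial config by one factor per pass.
import Mathlib
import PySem

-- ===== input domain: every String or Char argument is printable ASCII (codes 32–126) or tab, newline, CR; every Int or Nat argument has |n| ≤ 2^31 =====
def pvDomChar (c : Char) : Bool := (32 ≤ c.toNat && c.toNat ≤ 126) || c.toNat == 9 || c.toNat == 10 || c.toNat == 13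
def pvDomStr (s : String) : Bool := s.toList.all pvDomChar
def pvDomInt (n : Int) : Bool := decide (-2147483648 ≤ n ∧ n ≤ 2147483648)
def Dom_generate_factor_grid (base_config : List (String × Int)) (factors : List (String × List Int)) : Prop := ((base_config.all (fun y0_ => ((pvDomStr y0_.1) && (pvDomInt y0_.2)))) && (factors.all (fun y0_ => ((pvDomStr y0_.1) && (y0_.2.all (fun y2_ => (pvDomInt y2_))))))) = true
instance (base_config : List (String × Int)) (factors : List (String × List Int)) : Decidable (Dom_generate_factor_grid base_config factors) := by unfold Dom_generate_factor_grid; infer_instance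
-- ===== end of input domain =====

-- B builds the grid by an incremental fold extending partial configs one factor at a time instead of itertools.product; base_config is ignored exactly as in A.


-- ===== PORT A =====
-- itertools.product(*values): first list varies slowest, last fastest
def pyProductInt : List (List Int) → List (List Int)
  | [] => [[]]
  | vs :: rest => vs.flatMap (fun v => (pyProductInt rest).map (v :: ·))

-- config = {}; for key, value in zip(keys, combo): config[key] = value
def buildConfig (pairs : List (String × Int)) : PySem.Dict String Int :=
  pairs.foldl (fun d kv => d.insert kv.1 kv.2) PySem.Dict.empty

def generate_factor_grid (base_config : List (String × Int)) (factors : List (String × List Int)) : List (List (String × Int)) :=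
  let keys := factors.map (·.1)
  let values := factors.map (·.2)
  (pyProductInt values).map (fun combo => (buildConfig (keys.zip combo)).items)

-- ===== PORT B =====
def generate_factor_grid_alt (base_config : List (String × Int)) (factors : List (String × List Int)) : List (List (String × Int)) :=
  (factors.foldl
      (fun (cfgs : List (PySem.Dict String Int)) kv =>
        cfgs.flatMap (fun c => kv.2.map (fun v => c.insert kv.1 v)))
      [PySem.Dict.empty]).map PySem.Dict.items

-- ===== PRECONDITION & SPEC =====
def Spec_generate_factor_grid (base_config : List (String × Int)) (factors : List (String × List Int)) (out : List (List (String × Int))) : Prop := out = generate_factor_grid_alt base_config factors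
instance (base_config : List (String × Int)) (factors : List (String × List Int)) (out : List (List (String × Int))) : Decidable (Spec_generate_factor_grid base_config factors out) := by unfold Spec_generate_factor_grid; infer_instance

-- ===== CLAIM (what is proved, stated in full; the proofs are below) =====
def Claim_equal_generate_factor_grid : Prop := ∀ (base_config : List (String × Int)) (factors : List (String × List Int)), Dom_generate_factor_grid base_config factors → Spec_generate_factor_grid base_config factors (generate_factor_grid base_config factors)

-- ===== LEMMAS AND PROOFS =====
theorem fold_eq (factors : List (String × List Int)) (cs : List (PySem.Dict String Int)) :
    factors.foldl
        (fun (cfgs : List (PySem.Dict String Int)) kv =>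
          cfgs.flatMap (fun c => kv.2.map (fun v => c.insert kv.1 v)))
        cs
      = cs.flatMap (fun c =>
          (pyProductInt (factors.map (·.2))).map (fun combo =>
            ((factors.map (·.1)).zip combo).foldl (fun d kv => d.insert kv.1 kv.2) c)) := by
  induction factors generalizing cs with
  | nil => simp [pyProductInt]
  | cons kv rest ih =>
      simp only [List.foldl_cons, ih, pyProductInt, List.map_cons]
      simp only [List.flatMap_assoc, List.flatMap_map]
      congr 1
      funext c
      simp [List.map_flatMap, List.zip_cons_cons, Function.comp_def]

-- ===== VERDICT (by name: the statement is the Claim_ definition above) =====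
theorem generate_factor_grid_spec : Claim_equal_generate_factor_grid := by
  intro base_config factors _
  unfold Spec_generate_factor_grid generate_factor_grid generate_factor_grid_alt buildConfig
  rw [fold_eq]
  simp
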